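-- pv_equiv track=rewrite | github.com/Vauxoo/addons-vauxoo | controller_report_xls/controllers/main.py | is_string
-- ===== SOURCE A (Python) =====
-- def is_string(value, thousands_sep=',', decimal_point='.'):
--     """Tries to determine if value is not a numeric value, i.e. int or float"""
--     set_sign = set([thousands_sep, decimal_point, '-'])
--     set_val = set(list(value))
--
--     is_text = False
--     if any([val.isalpha() or val.isspace() for val in set_val]):
--         is_text = True
--     elif not all([val.isdigit() for val in set_val - set_sign]):
--         is_text = True
--     elif value.count('-') > 1:
--         is_text = True
--     elif value.count(decimal_point) > 1:
--         is_text = True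
--     elif '-' in set_val and not value[0] == '-':
--         is_text = True
--
--     return is_text
-- ===== SOURCE B (Python) =====
-- def is_string(value, thousands_sep=',', decimal_point='.'):
--     """Tries to determine if value is not a numeric value, i.e. int or float"""
--     if any(c.isalpha() or c.isspace()
--            or (c == '-' and i != 0)
--            or (c != '-' and c != thousands_sep and c != decimal_point
--                and not c.isdigit())
--            for i, c in enumerate(value)):
--         return True
--     return value.count(decimal_point) > 1
-- ===== Notes on version B (the rewrite author's own statement) =====
-- stated objective: simpler
-- what changed: A builds two sets and makes five separate full passes (set comprehensions, two substring counts, a membership test plus head check); B makes one short-circuiting scan over the enumerated characters (folding A's two '-' conditions into 'a minus at a position other than 0') followed by a single decimal-point count.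
import Mathlib
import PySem

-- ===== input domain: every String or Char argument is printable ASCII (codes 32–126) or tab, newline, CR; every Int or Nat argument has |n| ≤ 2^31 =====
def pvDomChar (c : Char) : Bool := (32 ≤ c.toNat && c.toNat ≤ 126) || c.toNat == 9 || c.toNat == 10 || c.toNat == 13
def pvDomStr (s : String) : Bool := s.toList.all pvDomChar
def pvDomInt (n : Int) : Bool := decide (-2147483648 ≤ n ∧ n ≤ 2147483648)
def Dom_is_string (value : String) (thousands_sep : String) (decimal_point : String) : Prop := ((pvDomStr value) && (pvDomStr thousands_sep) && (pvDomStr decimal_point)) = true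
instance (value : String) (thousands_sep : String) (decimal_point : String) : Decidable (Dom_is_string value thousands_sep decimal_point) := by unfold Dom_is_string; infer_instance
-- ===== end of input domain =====

-- B replaces A's two set constructions and five separate full passes by a single
-- short-circuiting scan over the characters plus one decimal-point count (objective: simpler).

-- ===== PORT A =====
def is_string (value : String) (thousands_sep : String) (decimal_point : String) : Bool :=
  let set_sign : PySem.Set String := PySem.Set.ofList [thousands_sep, decimal_point, "-"]
  let set_val : PySem.Set String := PySem.Set.ofList (value.toList.map (fun c => String.ofList [c]))
  if ((set_val : List String).map (fun v => PySem.Str.strIsalpha v || PySem.Str.strIsspace v)).any id then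
    true
  else if !(((PySem.Set.diff set_val set_sign) : List String).map (fun v => PySem.Str.strIsdigit v)).all id then
    true
  else if 1 < PySem.Str.count value "-" then
    true
  else if 1 < PySem.Str.count value decimal_point then
    true
  else if PySem.Set.contains set_val "-" && !(PySem.Str.pyGet? value 0 == some '-') then
    true
  else
    false

-- ===== PORT B =====
def is_string_alt (value : String) (thousands_sep : String) (decimal_point : String) : Bool :=
  if (PySem.List.enumerate value.toList 0).any (fun p =>
      PySem.Chars.isalpha p.2 || PySem.Chars.isspace p.2 ||
      (p.2 == '-' && p.1 != 0) ||
      (p.2 != '-' && String.ofList [p.2] != thousands_sep &&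
        String.ofList [p.2] != decimal_point && !(PySem.Chars.isdigit p.2))) then
    true
  else
    1 < PySem.Str.count value decimal_point

-- ===== PRECONDITION & SPEC =====
def Spec_is_string (value : String) (thousands_sep : String) (decimal_point : String) (out : Bool) : Prop := out = is_string_alt value thousands_sep decimal_point
instance (value : String) (thousands_sep : String) (decimal_point : String) (out : Bool) : Decidable (Spec_is_string value thousands_sep decimal_point out) := by unfold Spec_is_string; infer_instance

-- ===== CLAIM (what is proved, stated in full; the proofs are below) =====
def Claim_equal_is_string : Prop := ∀ (value : String) (thousands_sep : String) (decimal_point : String), Dom_is_string value thousands_sep decimal_point → Spec_is_string value thousands_sep decimal_point (is_string value thousands_sep decimal_point)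

-- ===== LEMMAS AND PROOFS =====

-- value.count('-') on a single-character needle is the character count
theorem pv_count_go_singleton (c : Char) (cs : List Char) (acc : Nat) :
    PySem.Chars.count.go [c] cs.length cs acc = acc + cs.count c := by
  induction cs generalizing acc with
  | nil => simp [PySem.Chars.count.go]
  | cons h t ih =>
    rw [show (h :: t).length = t.length + 1 from rfl]
    rw [PySem.Chars.count.go]
    by_cases hc : c = h
    · subst hc
      simp [List.isPrefixOf, ih]
      omega
    · simp [List.isPrefixOf, hc, ih, Ne.symm hc]

theorem pv_count_singleton (cs : List Char) (c : Char) :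
    PySem.Chars.count cs [c] = cs.count c := by
  simp [PySem.Chars.count, pv_count_go_singleton]

theorem pv_strIsdigit_single (c : Char) :
    PySem.Str.strIsdigit (String.ofList [c]) = PySem.Chars.isdigit c := by
  simp [PySem.Str.strIsdigit, PySem.Chars.strIsdigit]

theorem pv_ofList_single_eq_iff (c : Char) (s : String) :
    String.ofList [c] = s ↔ s.toList = [c] := by
  constructor
  · rintro rfl; simp
  · intro h; rw [← h]; simp [String.ofList]

-- the positions k ≥ 1 holding '-' are exactly A's two minus conditions
theorem pv_minus_pos_iff (cs : List Char) :
    (∃ k, ∃ _ : k < cs.length, cs[k] = '-' ∧ k ≠ 0) ↔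
      (1 < cs.count '-' ∨ ('-' ∈ cs ∧ ¬ cs[0]? = some '-')) := by
  constructor
  · rintro ⟨k, hk, hc, hk0⟩
    obtain ⟨m, rfl⟩ : ∃ m, k = m + 1 := ⟨k - 1, by omega⟩
    cases cs with
    | nil => simp at hk
    | cons h t =>
      have hkt : m < t.length := by simpa using hk
      have hct : t[m] = '-' := by simpa using hc
      have hmem : '-' ∈ t := hct ▸ List.getElem_mem hkt
      by_cases hh : h = '-'
      · left
        have h1 := List.one_le_count_iff.mpr hmem
        simp [hh]
        omega
      · right
        exact ⟨List.mem_cons_of_mem _ hmem, by simp [hh]⟩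
  · rintro (hcount | ⟨hmem, hhead⟩)
    · cases cs with
      | nil => simp at hcount
      | cons h t =>
        have ht : '-' ∈ t := by
          by_contra hnot
          have h0 : t.count '-' = 0 := List.count_eq_zero.mpr hnot
          have hle : (h :: t).count '-' ≤ 1 := by
            rw [List.count_cons, h0]
            split <;> omega
          omega
        rcases List.mem_iff_getElem.mp ht with ⟨j, hj, hje⟩
        exact ⟨j + 1, by simpa using Nat.succ_lt_succ hj, by simpa using hje, by omega⟩
    · rcases List.mem_iff_getElem.mp hmem with ⟨k, hk, hke⟩
      refine ⟨k, hk, hke, ?_⟩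
      intro h0
      subst h0
      exact hhead (by rw [List.getElem?_eq_getElem hk, hke])

theorem pv_single_eq_dash (c : Char) : String.ofList [c] = "-" ↔ c = '-' := by
  rw [pv_ofList_single_eq_iff]
  constructor
  · intro h
    have : (['-'] : List Char) = [c] := h
    simpa using this.symm
  · rintro rfl; rfl

theorem pv_pyGet0 (v : String) : PySem.Str.pyGet? v 0 = v.toList[0]? := by
  have h := PySem.List.pyGet?_natCast (xs := v.toList) (n := 0)
  simpa [PySem.Str.pyGet?] using h

-- A's boolean result characterised as five conditions on the character list
theorem pv_A_iff (v t d : String) :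
    is_string v t d = true ↔
      ((∃ c ∈ v.toList, PySem.Chars.isalpha c = true ∨ PySem.Chars.isspace c = true)
       ∨ (∃ c ∈ v.toList, String.ofList [c] ≠ t ∧ String.ofList [c] ≠ d ∧ c ≠ '-' ∧
            PySem.Chars.isdigit c = false)
       ∨ 1 < v.toList.count '-'
       ∨ 1 < PySem.Chars.count v.toList d.toList
       ∨ ('-' ∈ v.toList ∧ ¬ v.toList[0]? = some '-')) := by
  have hA1 : (((PySem.Set.ofList (v.toList.map (fun c => String.ofList [c])) : List String).map
      (fun s => PySem.Str.strIsalpha s || PySem.Str.strIsspace s)).any id = true) ↔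
      (∃ c ∈ v.toList, PySem.Chars.isalpha c = true ∨ PySem.Chars.isspace c = true) := by
    simp [List.any_eq_true, PySem.Set.mem_ofList, PySem.Str.strIsalpha, PySem.Str.strIsspace,
      PySem.Chars.strIsalpha, PySem.Chars.strIsspace]
  have hA2 : ((((PySem.Set.diff (PySem.Set.ofList (v.toList.map (fun c => String.ofList [c])))
      (PySem.Set.ofList [t, d, "-"])) : List String).map (fun s => PySem.Str.strIsdigit s)).all id = false) ↔
      (∃ c ∈ v.toList, String.ofList [c] ≠ t ∧ String.ofList [c] ≠ d ∧ c ≠ '-' ∧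
        PySem.Chars.isdigit c = false) := by
    rw [← Bool.not_eq_true, List.all_eq_true]
    simp only [not_forall, List.mem_map, id]
    constructor
    · rintro ⟨b, ⟨s, hs, rfl⟩, hb⟩
      obtain ⟨hsv, hsn⟩ := (PySem.Set.mem_diff _ _ s).mp hs
      obtain ⟨c, hc, rfl⟩ : ∃ c ∈ v.toList, String.ofList [c] = s := by
        simpa [List.mem_map] using (PySem.Set.mem_ofList _ s).mp hsv
      rw [PySem.Set.mem_ofList] at hsn
      simp only [List.mem_cons, List.not_mem_nil, or_false, not_or] at hsn
      refine ⟨c, hc, hsn.1, hsn.2.1, ?_, ?_⟩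
      · intro hcd
        exact hsn.2.2 ((pv_single_eq_dash c).mpr hcd)
      · rw [← pv_strIsdigit_single c]
        simpa using hb
    · rintro ⟨c, hc, hct, hcd, hcm, hdig⟩
      refine ⟨PySem.Str.strIsdigit (String.ofList [c]), ⟨String.ofList [c], ?_, rfl⟩, ?_⟩
      · rw [PySem.Set.mem_diff]
        constructor
        · rw [PySem.Set.mem_ofList]
          exact List.mem_map.mpr ⟨c, hc, rfl⟩
        · rw [PySem.Set.mem_ofList]
          simp only [List.mem_cons, List.not_mem_nil, or_false, not_or]
          exact ⟨hct, hcd, fun h => hcm ((pv_single_eq_dash c).mp h)⟩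
      · simp [PySem.Str.strIsdigit, PySem.Chars.strIsdigit, hdig]
  have hA5 : (PySem.Set.contains (PySem.Set.ofList (v.toList.map (fun c => String.ofList [c]))) "-"
      && !(PySem.Str.pyGet? v 0 == some '-')) = true ↔
      ('-' ∈ v.toList ∧ ¬ v.toList[0]? = some '-') := by
    rw [Bool.and_eq_true]
    rw [PySem.Set.contains_iff, PySem.Set.mem_ofList]
    simp only [List.mem_map, pv_single_eq_dash, pv_pyGet0, Bool.not_eq_true', beq_eq_false_iff_ne,
      ne_eq]
    constructor
    · rintro ⟨⟨c, hc, rfl⟩, h⟩; exact ⟨hc, h⟩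
    · rintro ⟨hc, h⟩; exact ⟨⟨'-', hc, rfl⟩, h⟩
  have hcnt : PySem.Str.count v "-" = v.toList.count '-' := by
    rw [PySem.Str.count]
    exact pv_count_singleton v.toList '-'
  unfold is_string
  simp only []
  split_ifs with h1 h2 h3 h4 h5
  · simp only [true_iff]
    exact Or.inl (hA1.mp h1)
  · simp only [true_iff]
    refine Or.inr (Or.inl (hA2.mp ?_))
    simpa using h2
  · simp only [true_iff]
    rw [hcnt] at h3
    exact Or.inr (Or.inr (Or.inl h3))
  · simp only [true_iff]
    exact Or.inr (Or.inr (Or.inr (Or.inl h4)))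
  · simp only [true_iff]
    exact Or.inr (Or.inr (Or.inr (Or.inr (hA5.mp h5))))
  · simp only [false_iff, not_or]
    refine ⟨fun h => h1 (hA1.mpr h), fun h => h2 ?_, fun h => h3 (by rwa [hcnt]), h4,
      fun h => h5 (hA5.mpr h)⟩
    have := hA2.mpr h
    simpa using this

-- B's boolean result characterised
theorem pv_B_iff (v t d : String) :
    is_string_alt v t d = true ↔
      ((∃ k, ∃ _ : k < v.toList.length,
          PySem.Chars.isalpha v.toList[k] = true ∨ PySem.Chars.isspace v.toList[k] = true ∨
          (v.toList[k] = '-' ∧ k ≠ 0) ∨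
          (v.toList[k] ≠ '-' ∧ String.ofList [v.toList[k]] ≠ t ∧ String.ofList [v.toList[k]] ≠ d ∧
            PySem.Chars.isdigit v.toList[k] = false))
       ∨ 1 < PySem.Chars.count v.toList d.toList) := by
  unfold is_string_alt
  split_ifs with h
  · simp only [true_iff]
    left
    rw [List.any_eq_true] at h
    obtain ⟨p, hp, hpred⟩ := h
    obtain ⟨k, hk, rfl⟩ := (PySem.List.mem_enumerate_iff _ _ p).mp hp
    refine ⟨k, hk, ?_⟩
    simpa [Bool.or_eq_true, Bool.and_eq_true, and_assoc, or_assoc] using hpred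
  · simp only [decide_eq_true_eq, PySem.Str.count]
    constructor
    · intro h4; exact Or.inr h4
    · rintro (⟨k, hk, hcase⟩ | h4)
      · exfalso
        apply h
        rw [List.any_eq_true]
        refine ⟨((0 : Int) + k, v.toList[k]), (PySem.List.mem_enumerate_iff _ _ _).mpr ⟨k, hk, rfl⟩, ?_⟩
        simpa [Bool.or_eq_true, Bool.and_eq_true, and_assoc, or_assoc] using hcase
      · exact h4

-- ===== VERDICT (by name: the statement is the Claim_ definition above) =====
theorem is_string_spec : Claim_equal_is_string := by
  intro v t d _
  unfold Spec_is_string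
  rw [Bool.eq_iff_iff, pv_A_iff, pv_B_iff]
  constructor
  · rintro (⟨c, hc, h⟩ | ⟨c, hc, hct, hcd, hcm, hdig⟩ | h3 | h4 | h5)
    · obtain ⟨k, hk, rfl⟩ := List.mem_iff_getElem.mp hc
      exact Or.inl ⟨k, hk, by tauto⟩
    · obtain ⟨k, hk, rfl⟩ := List.mem_iff_getElem.mp hc
      exact Or.inl ⟨k, hk, by tauto⟩
    · obtain ⟨k, hk, hckk, hk0⟩ := (pv_minus_pos_iff v.toList).mpr (Or.inl h3)
      exact Or.inl ⟨k, hk, by tauto⟩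
    · exact Or.inr h4
    · obtain ⟨k, hk, hckk, hk0⟩ := (pv_minus_pos_iff v.toList).mpr (Or.inr h5)
      exact Or.inl ⟨k, hk, by tauto⟩
  · rintro (⟨k, hk, (h | h | ⟨hm, hk0⟩ | ⟨hcm, hct, hcd, hdig⟩)⟩ | h4)
    · exact Or.inl ⟨v.toList[k], List.getElem_mem hk, Or.inl h⟩
    · exact Or.inl ⟨v.toList[k], List.getElem_mem hk, Or.inr h⟩
    · rcases (pv_minus_pos_iff v.toList).mp ⟨k, hk, hm, hk0⟩ with h3 | h5
      · exact Or.inr (Or.inr (Or.inl h3))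
      · exact Or.inr (Or.inr (Or.inr (Or.inr h5)))
    · exact Or.inr (Or.inl ⟨v.toList[k], List.getElem_mem hk, hct, hcd, hcm, hdig⟩)
    · exact Or.inr (Or.inr (Or.inr (Or.inl h4)))
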